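-- pv_equiv track=rewrite | github.com/choprashweta/classifier-bias | gender_swap_perturbation/pronoun_transformation/swap_gender_pronouns.py | swap_pronouns
-- ===== SOURCE A (Python) =====
-- PRONOUNS = [
--     ("himself", "herself", "themselves"),
--     ("him", "her", "them"),
--     ("his", "hers", "theirs"),
--     ("his", "her", "their"),
--     ("he", "she", "they"),
--     ("man", "woman", "person"),
--     ("men", "women", "people"),
--     ("boys", "girls", "children"),
--     ("boy", "girl", "child"),
--     ("sons", "daughters", "children"),
--     ("son", "daughter", "child"),
--     ("brother", "sister", "sibling"),
--     ("brothers", "sisters", "siblings"),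
--     ("male", "female", "person"),
--     ("males", "females", "people"),
--     ("father", "mother", "parent"),
--     ("fathers", "mothers", "parents"),
--     ("uncle", "aunt", "relative"),
--     ("uncles", "aunts", "relatives"),
--     ("husband", "wife", "spouse"),
--     ("husbands", "wives", "spouses")
--
-- ]
--
-- def gender_id_to_name(id: int) -> str:
--     """
--     Convert a gender id to its corresponding name.
--
--     Parameters
--     ----------
--     name
--         The gender id to be converted.
--
--     Returns
--     -------
--     A str corresponding to the correct name in the pronoun lookup table.
--     """
--     if id == 0:
--         return 'male'
--     elif id == 1:
--         return 'female'
--     else: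
--         return 'neutral'
--
-- def swap_pronouns(ngram: str, a_gender: int, b_gender: int) -> str:
--     """
--     The same as `replace_pronouns`, except instead of transforming from
--     `from_gender` to `to_gender`, this function swaps any pronoun between
--     `a_gender` and `b_gender`. See `replace_pronouns` for more details.
--     """
--     for pronoun_group in PRONOUNS:
--         if pronoun_group[a_gender] in ngram:
--             updated_ngram = [pronoun_group[b_gender] if pronoun_group[a_gender] == token else token for token in list(ngram.split(" "))]
--             updated_ngram = " ".join(updated_ngram)
--
--             if updated_ngram != ngram:
--                 return updated_ngram, "{} to {}".format(gender_id_to_name(a_gender), gender_id_to_name(b_gender))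
--
--         if pronoun_group[b_gender] in ngram:
--             updated_ngram = [pronoun_group[a_gender] if pronoun_group[b_gender] == token else token for token in list(ngram.split(" "))]
--             updated_ngram = " ".join(updated_ngram)
--
--             if updated_ngram != ngram:
--                 return updated_ngram, "{} to {}".format(gender_id_to_name(b_gender), gender_id_to_name(a_gender))
--
--     return ngram, "null"
-- ===== SOURCE B (Python) =====
-- PRONOUNS = [
--     ("himself", "herself", "themselves"),
--     ("him", "her", "them"),
--     ("his", "hers", "theirs"),
--     ("his", "her", "their"),
--     ("he", "she", "they"),
--     ("man", "woman", "person"),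
--     ("men", "women", "people"),
--     ("boys", "girls", "children"),
--     ("boy", "girl", "child"),
--     ("sons", "daughters", "children"),
--     ("son", "daughter", "child"),
--     ("brother", "sister", "sibling"),
--     ("brothers", "sisters", "siblings"),
--     ("male", "female", "person"),
--     ("males", "females", "people"),
--     ("father", "mother", "parent"),
--     ("fathers", "mothers", "parents"),
--     ("uncle", "aunt", "relative"),
--     ("uncles", "aunts", "relatives"),
--     ("husband", "wife", "spouse"),
--     ("husbands", "wives", "spouses")
-- ]
--
-- def gender_id_to_name(id: int) -> str:
--     if id == 0:
--         return 'male'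
--     elif id == 1:
--         return 'female'
--     else:
--         return 'neutral'
--
-- def swap_pronouns(ngram: str, a_gender: int, b_gender: int) -> str:
--     label_ab = "{} to {}".format(gender_id_to_name(a_gender), gender_id_to_name(b_gender))
--     label_ba = "{} to {}".format(gender_id_to_name(b_gender), gender_id_to_name(a_gender))
--     entries = [e for group in PRONOUNS
--                  for e in ((group[a_gender], group[b_gender], label_ab),
--                            (group[b_gender], group[a_gender], label_ba))]
--     # one swap table, first insertion wins, identity pairs dropped
--     table = []
--     seen = set()
--     for w, r, label in entries:
--         if r != w and w not in seen:
--             seen.add(w)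
--             table.append((w, r, label))
--     tokens = ngram.split(" ")
--     for w, r, label in table:
--         if w in tokens:
--             return " ".join(r if w == t else t for t in tokens), label
--     return ngram, "null"
-- ===== Notes on version B (the rewrite author's own statement) =====
-- stated objective: alternative
-- what changed: B precomputes one deduplicated word->(replacement,label) swap table and splits the ngram once, then returns on the first table entry whose word occurs as a token, replacing A's per-group substring test + re-split + join + changed-ngram comparison.
import Mathlib
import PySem

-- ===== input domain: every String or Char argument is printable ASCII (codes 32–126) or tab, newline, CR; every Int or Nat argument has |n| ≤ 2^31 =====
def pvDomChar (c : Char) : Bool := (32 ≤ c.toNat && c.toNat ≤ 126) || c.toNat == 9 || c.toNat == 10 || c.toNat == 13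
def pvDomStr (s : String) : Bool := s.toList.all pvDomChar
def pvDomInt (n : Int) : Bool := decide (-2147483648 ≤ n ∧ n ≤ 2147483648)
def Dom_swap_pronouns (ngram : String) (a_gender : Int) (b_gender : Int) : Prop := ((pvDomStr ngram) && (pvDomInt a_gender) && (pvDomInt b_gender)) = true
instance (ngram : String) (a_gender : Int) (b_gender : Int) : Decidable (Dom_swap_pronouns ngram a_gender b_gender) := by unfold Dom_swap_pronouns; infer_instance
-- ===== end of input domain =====

-- B precomputes one deduplicated swap table (word → replacement, label) and scans the token
-- list once, instead of A's per-group substring test + re-split + join + change-compare;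
-- objective: alternative (same asymptotic cost, plainer single-scan semantics).

-- ===== shared module-level context (PRONOUNS table and helpers both Pythons use) =====
def PRONOUNS : List (String × String × String) := [
  ("himself", "herself", "themselves"),
  ("him", "her", "them"),
  ("his", "hers", "theirs"),
  ("his", "her", "their"),
  ("he", "she", "they"),
  ("man", "woman", "person"),
  ("men", "women", "people"),
  ("boys", "girls", "children"),
  ("boy", "girl", "child"),
  ("sons", "daughters", "children"),
  ("son", "daughter", "child"),
  ("brother", "sister", "sibling"),
  ("brothers", "sisters", "siblings"),
  ("male", "female", "person"),
  ("males", "females", "people"),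
  ("father", "mother", "parent"),
  ("fathers", "mothers", "parents"),
  ("uncle", "aunt", "relative"),
  ("uncles", "aunts", "relatives"),
  ("husband", "wife", "spouse"),
  ("husbands", "wives", "spouses")]

def gender_id_to_name (id : Int) : String :=
  if id = 0 then "male" else if id = 1 then "female" else "neutral"

-- Python 3-tuple indexing group[i]: valid indices are -3..2 (negative = from the end);
-- any other index raises IndexError in Python and is excluded by Pre_ ("" is only
-- produced outside Pre_, where nothing is claimed).
def tupGet (g : String × String × String) (i : Int) : String :=
  if i = 0 ∨ i = -3 then g.1
  else if i = 1 ∨ i = -2 then g.2.1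
  else if i = 2 ∨ i = -1 then g.2.2
  else ""

-- ngram.split(" "): sep is non-empty so Str.split? is never none
def pySplit (s : String) : List String := (PySem.Str.split? s " ").getD []

-- A's two lines 'updated = [w_to if w_from == token else token for token in ngram.split(" ")];
-- updated = " ".join(updated)' (A recomputes the split inside its loop, so this helper does too)
def mkUpd (wFrom wTo ngram : String) : String :=
  PySem.Str.join " " ((pySplit ngram).map (fun t => if wFrom = t then wTo else t))

-- ===== PORT A =====
def swapGo (groups : List (String × String × String)) (ngram : String) (a_gender : Int) (b_gender : Int) : String × String :=
  match groups with
  | [] => (ngram, "null")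
  | g :: rest =>
    -- 'if pronoun_group[a_gender] in ngram: ... if updated != ngram: return ...'
    match (if PySem.Str.isIn (tupGet g a_gender) ngram = true then
             if mkUpd (tupGet g a_gender) (tupGet g b_gender) ngram ≠ ngram then
               some (mkUpd (tupGet g a_gender) (tupGet g b_gender) ngram,
                     gender_id_to_name a_gender ++ " to " ++ gender_id_to_name b_gender)
             else none
           else none) with
    | some res => res
    | none =>
      -- 'if pronoun_group[b_gender] in ngram: ... if updated != ngram: return ...'
      match (if PySem.Str.isIn (tupGet g b_gender) ngram = true then
               if mkUpd (tupGet g b_gender) (tupGet g a_gender) ngram ≠ ngram then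
                 some (mkUpd (tupGet g b_gender) (tupGet g a_gender) ngram,
                       gender_id_to_name b_gender ++ " to " ++ gender_id_to_name a_gender)
               else none
             else none) with
      | some res => res
      | none => swapGo rest ngram a_gender b_gender

def swap_pronouns (ngram : String) (a_gender : Int) (b_gender : Int) : String × String :=
  swapGo PRONOUNS ngram a_gender b_gender

-- ===== PORT B =====
-- the flattened candidate entries (word, replacement, label): per group a→b then b→a
def mkEntries (groups : List (String × String × String)) (a_gender : Int) (b_gender : Int) (labAB : String) (labBA : String) : List (String × String × String) :=
  groups.flatMap (fun g =>
    [(tupGet g a_gender, tupGet g b_gender, labAB),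
     (tupGet g b_gender, tupGet g a_gender, labBA)])

-- keep the first insertion per word, drop identity pairs
def buildTable (entries : List (String × String × String)) (seen : PySem.Set String) : List (String × String × String) :=
  match entries with
  | [] => []
  | (w, r, lab) :: rest =>
    if r ≠ w ∧ ¬ PySem.Set.contains seen w then (w, r, lab) :: buildTable rest (PySem.Set.add seen w)
    else buildTable rest seen

def scanTable (table : List (String × String × String)) (tokens : List String) (ngram : String) : String × String :=
  match table with
  | [] => (ngram, "null")
  | (w, r, lab) :: rest =>
    if w ∈ tokens then (PySem.Str.join " " (tokens.map (fun t => if w = t then r else t)), lab)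
    else scanTable rest tokens ngram

def swap_pronouns_alt (ngram : String) (a_gender : Int) (b_gender : Int) : String × String :=
  scanTable
    (buildTable
      (mkEntries PRONOUNS a_gender b_gender
        (gender_id_to_name a_gender ++ " to " ++ gender_id_to_name b_gender)
        (gender_id_to_name b_gender ++ " to " ++ gender_id_to_name a_gender))
      PySem.Set.empty)
    (pySplit ngram) ngram

-- ===== PRECONDITION & SPEC =====
-- Python indexes each 3-tuple with a_gender and b_gender already on the first group, so A (and B)
-- raise IndexError exactly when either index is outside -3..2; those inputs are excluded.
def Pre_swap_pronouns (ngram : String) (a_gender : Int) (b_gender : Int) : Prop :=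
  (-3 ≤ a_gender ∧ a_gender ≤ 2) ∧ (-3 ≤ b_gender ∧ b_gender ≤ 2)
instance (ngram : String) (a_gender : Int) (b_gender : Int) : Decidable (Pre_swap_pronouns ngram a_gender b_gender) := by unfold Pre_swap_pronouns; infer_instance

def pvWitness_swap_pronouns : String × Int × Int := ("he went home", 0, 1)

def Spec_swap_pronouns (ngram : String) (a_gender : Int) (b_gender : Int) (out : String × String) : Prop := out = swap_pronouns_alt ngram a_gender b_gender
instance (ngram : String) (a_gender : Int) (b_gender : Int) (out : String × String) : Decidable (Spec_swap_pronouns ngram a_gender b_gender out) := by unfold Spec_swap_pronouns; infer_instance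

-- ===== CLAIM (what is proved, stated in full; the proofs are below) =====
def Claim_equal_swap_pronouns : Prop := ∀ (ngram : String) (a_gender : Int) (b_gender : Int), Dom_swap_pronouns ngram a_gender b_gender → Pre_swap_pronouns ngram a_gender b_gender → Spec_swap_pronouns ngram a_gender b_gender (swap_pronouns ngram a_gender b_gender)

-- ===== LEMMAS AND PROOFS =====

-- ---- generic list/split facts ----
theorem pv_map_eq_self_mem {α : Type} (l : List α) (f : α → α) (h : l.map f = l) (x : α) (hx : x ∈ l) : f x = x := by
  induction l with
  | nil => cases hx
  | cons a t ih =>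
    simp only [List.map_cons, List.cons.injEq] at h
    cases hx with
    | head => exact h.1
    | tail _ hx => exact ih h.2 hx

theorem pv_infix_intercalate (sep : List Char) (L : List (List Char)) (l : List Char) (h : l ∈ L) : l <:+: sep.intercalate L := by
  rw [List.intercalate]
  apply List.infix_of_mem_flatten
  induction L with
  | nil => cases h
  | cons a t ih =>
    cases t with
    | nil => simpa using h
    | cons b t' =>
      rw [List.intersperse_cons₂]
      simp only [List.mem_cons] at h ⊢
      rcases h with rfl | h
      · left; rfl
      · right; right
        have := ih (by simpa using h)
        simpa using this

theorem pv_splitOnP_go_pieces (P : Char → Bool) : ∀ (l acc : List Char), (∀ x ∈ acc, ¬ P x) →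
    ∀ p ∈ List.splitOnP.go P l acc, ∀ x ∈ p, ¬ P x := by
  intro l
  induction l with
  | nil =>
    intro acc hacc p hp
    simp only [List.splitOnP.go, List.mem_singleton] at hp
    subst hp; simpa using hacc
  | cons a t ih =>
    intro acc hacc p hp
    simp only [List.splitOnP.go] at hp
    by_cases hP : P a
    · rw [if_pos hP] at hp
      simp only [List.mem_cons] at hp
      rcases hp with rfl | hp
      · simpa using hacc
      · exact ih [] (by simp) p hp
    · rw [if_neg hP] at hp
      refine ih (a :: acc) ?_ p hp
      intro x hx
      simp only [List.mem_cons] at hx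
      rcases hx with rfl | hx
      · exact hP
      · exact hacc x hx

theorem pv_splitOn_pieces (c : Char) (s : List Char) (p : List Char) (h : p ∈ List.splitOn c s) (x : Char) (hx : x ∈ p) : x ≠ c := by
  intro he
  subst he
  exact pv_splitOnP_go_pieces (· == x) s [] (by simp) p h x hx (by simp)

-- PySem's fuel-based splitOn agrees with Mathlib's List.splitOn for a one-char separator
theorem pv_splitOn_go_bridge (c : Char) : ∀ (fuel : Nat) (l cur : List Char) (acc : List (List Char)), l.length < fuel →
    PySem.Chars.splitOn.go [c] fuel l cur acc.reverse = acc ++ List.splitOnP.go (· == c) l cur := by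
  intro fuel
  induction fuel with
  | zero => intro l cur acc hl; omega
  | succ f ih =>
    intro l cur acc hl
    cases l with
    | nil => simp [PySem.Chars.splitOn.go, List.splitOnP.go]
    | cons a t =>
      simp only [PySem.Chars.splitOn.go]
      by_cases hc : a = c
      · subst hc
        have hpre : [a].isPrefixOf (a :: t) = true := by simp [List.isPrefixOf]
        rw [if_pos hpre]
        have h2 : (cur.reverse :: acc.reverse) = (acc ++ [cur.reverse]).reverse := by simp
        rw [List.length_singleton, List.drop_one, List.tail_cons, h2,
            ih t [] (acc ++ [cur.reverse]) (by simp at hl ⊢; omega)]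
        simp [List.splitOnP.go]
      · have hpre : [c].isPrefixOf (a :: t) = false := by
          simp [List.isPrefixOf]
          exact fun h => hc h.symm
        rw [if_neg (by simp [hpre])]
        rw [ih t (a :: cur) acc (by simp at hl ⊢; omega)]
        simp [List.splitOnP.go, hc]

theorem pv_pysem_splitOn_eq (c : Char) (s : List Char) : PySem.Chars.splitOn s [c] = List.splitOn c s := by
  have := pv_splitOn_go_bridge c (s.length + 1) s [] [] (by omega)
  simpa [PySem.Chars.splitOn, List.splitOn, List.splitOnP] using this

-- ---- pySplit characterisation ----
theorem pv_pySplit_eq (s : String) : pySplit s = (List.splitOn ' ' s.toList).map String.ofList := by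
  have hsep : (" " : String).toList = [' '] := rfl
  simp [pySplit, PySem.Str.split?, PySem.Chars.split?, hsep, pv_pysem_splitOn_eq]

theorem pv_str_eq_of_toList {s t : String} (h : s.toList = t.toList) : s = t := by
  have := congrArg String.ofList h
  simpa [String.ofList_toList] using this

theorem pv_toList_mkUpd (w r ngram : String) :
    (mkUpd w r ngram).toList =
      [' '].intercalate ((List.splitOn ' ' ngram.toList).map
        (fun p => if w.toList = p then r.toList else p)) := by
  have hsep : (" " : String).toList = [' '] := rfl
  rw [mkUpd, pv_pySplit_eq]
  rw [PySem.Str.toList_join, hsep, List.map_map, List.map_map, PySem.Chars.join]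
  congr 1
  apply List.map_congr_left
  intro p _
  by_cases hwp : w.toList = p
  · have : w = String.ofList p := by rw [← hwp, String.ofList_toList]
    simp [Function.comp, this]
  · have : w ≠ String.ofList p := by
      intro he; apply hwp; rw [he]; simp [String.toList_ofList]
    simp [Function.comp, this, hwp]

theorem pv_mem_pySplit_iff (w ngram : String) :
    w ∈ pySplit ngram ↔ w.toList ∈ List.splitOn ' ' ngram.toList := by
  rw [pv_pySplit_eq]
  constructor
  · intro h
    rcases List.mem_map.mp h with ⟨p, hp, rfl⟩
    simpa [String.toList_ofList] using hp
  · intro h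
    refine List.mem_map.mpr ⟨w.toList, h, ?_⟩
    simp [String.ofList_toList]

-- if the entry does not change any token, mkUpd gives back ngram unchanged
theorem pv_mkUpd_id (w r ngram : String) (h : w ∉ pySplit ngram ∨ r = w) : mkUpd w r ngram = ngram := by
  apply pv_str_eq_of_toList
  rw [pv_toList_mkUpd]
  have hmap : (List.splitOn ' ' ngram.toList).map
      (fun p => if w.toList = p then r.toList else p) = List.splitOn ' ' ngram.toList := by
    refine (List.map_congr_left ?_).trans (List.map_id _)
    intro p hp
    rcases h with h | hrw
    · have : w.toList ≠ p := by
        intro he; exact h ((pv_mem_pySplit_iff w ngram).mpr (he ▸ hp))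
      simp [this]
    · rw [hrw]
      by_cases hwp : w.toList = p
      · simp [hwp]
      · simp [hwp]
  rw [hmap, List.intercalate_splitOn]

-- the key bridge: A's per-entry firing condition equals B's
theorem pv_cond_iff (ngram w r : String) (_hw : ' ' ∉ w.toList) (hr : ' ' ∉ r.toList) :
    (PySem.Str.isIn w ngram = true ∧ mkUpd w r ngram ≠ ngram) ↔ (w ∈ pySplit ngram ∧ r ≠ w) := by
  constructor
  · rintro ⟨-, hne⟩
    by_cases hmem : w ∈ pySplit ngram
    · refine ⟨hmem, fun hrw => hne (pv_mkUpd_id w r ngram (Or.inr hrw))⟩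
    · exact absurd (pv_mkUpd_id w r ngram (Or.inl hmem)) hne
  · rintro ⟨hmem, hrw⟩
    have hmemL : w.toList ∈ List.splitOn ' ' ngram.toList := (pv_mem_pySplit_iff w ngram).mp hmem
    constructor
    · rw [PySem.Str.isIn_iff_infix]
      have := pv_infix_intercalate [' '] (List.splitOn ' ' ngram.toList) w.toList hmemL
      rwa [List.intercalate_splitOn] at this
    · intro heq
      have htl := congrArg String.toList heq
      rw [pv_toList_mkUpd] at htl
      set parts := List.splitOn ' ' ngram.toList with hparts
      set g : List Char → List Char := fun p => if w.toList = p then r.toList else p with hg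
      have hpieces : ∀ l ∈ parts.map g, ' ' ∉ l := by
        intro l hl
        rcases List.mem_map.mp hl with ⟨p, hp, rfl⟩
        by_cases hwp : w.toList = p
        · simpa [hg, hwp] using hr
        · intro hsp
          exact pv_splitOn_pieces ' ' ngram.toList p hp ' ' (by simpa [hg, hwp] using hsp) rfl
      have hne : parts.map g ≠ [] := by
        simp only [ne_eq, List.map_eq_nil_iff]
        rw [hparts, List.splitOn]
        exact List.splitOnP_ne_nil _ _
      have hsplit : List.splitOn ' ' ([' '].intercalate (parts.map g)) = parts.map g :=
        List.splitOn_intercalate (parts.map g) ' ' hpieces hne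
      rw [htl, hparts] at hsplit
      have hself : g w.toList = w.toList := pv_map_eq_self_mem parts g hsplit.symm w.toList hmemL
      have : r.toList = w.toList := by simpa [hg] using hself
      exact hrw (pv_str_eq_of_toList this)

-- ---- space-freeness of every word the table can produce ----
def pvSf (g : String × String × String) : Prop :=
  ' ' ∉ g.1.toList ∧ ' ' ∉ g.2.1.toList ∧ ' ' ∉ g.2.2.toList

theorem pv_PRONOUNS_sf : ∀ g ∈ PRONOUNS, pvSf g := by unfold pvSf PRONOUNS; decide

theorem pv_tupGet_sf (g : String × String × String) (hg : pvSf g) (i : Int) : ' ' ∉ (tupGet g i).toList := by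
  rw [tupGet]
  split_ifs with h1 h2 h3
  · exact hg.1
  · exact hg.2.1
  · exact hg.2.2
  · simp

-- ---- A's loop = single scan of the flattened entry list under B's condition ----
def scanP (L : List (String × String × String)) (ngram : String) : String × String :=
  match L with
  | [] => (ngram, "null")
  | (w, r, lab) :: rest =>
    if w ∈ pySplit ngram ∧ r ≠ w then (mkUpd w r ngram, lab) else scanP rest ngram

theorem pv_swapGo_eq_scanP (ngram : String) (a_gender b_gender : Int) :
    ∀ groups, (∀ g ∈ groups, pvSf g) →
    swapGo groups ngram a_gender b_gender =
      scanP (mkEntries groups a_gender b_gender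
              (gender_id_to_name a_gender ++ " to " ++ gender_id_to_name b_gender)
              (gender_id_to_name b_gender ++ " to " ++ gender_id_to_name a_gender)) ngram := by
  intro groups
  induction groups with
  | nil => intro _; rfl
  | cons g rest ih =>
    intro hsf
    have hg := hsf g (List.mem_cons_self ..)
    have hwa := pv_tupGet_sf g hg a_gender
    have hwb := pv_tupGet_sf g hg b_gender
    have hrest := ih (fun x hx => hsf x (List.mem_cons_of_mem _ hx))
    rw [mkEntries, List.flatMap_cons, List.cons_append, List.cons_append, List.nil_append]
    rw [swapGo, scanP, scanP]
    by_cases hc1 : tupGet g a_gender ∈ pySplit ngram ∧ tupGet g b_gender ≠ tupGet g a_gender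
    · obtain ⟨hin, hch⟩ := (pv_cond_iff ngram (tupGet g a_gender) (tupGet g b_gender) hwa hwb).mpr hc1
      rw [if_pos hin, if_pos hch, if_pos hc1]
    · have h1 : (if PySem.Str.isIn (tupGet g a_gender) ngram = true then
          if mkUpd (tupGet g a_gender) (tupGet g b_gender) ngram ≠ ngram then
            some (mkUpd (tupGet g a_gender) (tupGet g b_gender) ngram,
                  gender_id_to_name a_gender ++ " to " ++ gender_id_to_name b_gender)
          else none
        else none) = (none : Option (String × String)) := by
        by_cases hin : PySem.Str.isIn (tupGet g a_gender) ngram = true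
        · have hch : ¬ mkUpd (tupGet g a_gender) (tupGet g b_gender) ngram ≠ ngram :=
            fun hch => hc1 ((pv_cond_iff ngram _ _ hwa hwb).mp ⟨hin, hch⟩)
          rw [if_pos hin, if_neg hch]
        · rw [if_neg hin]
      rw [h1, if_neg hc1]
      by_cases hc2 : tupGet g b_gender ∈ pySplit ngram ∧ tupGet g a_gender ≠ tupGet g b_gender
      · obtain ⟨hin, hch⟩ := (pv_cond_iff ngram (tupGet g b_gender) (tupGet g a_gender) hwb hwa).mpr hc2
        rw [if_pos hin, if_pos hch, if_pos hc2]
      · have h2 : (if PySem.Str.isIn (tupGet g b_gender) ngram = true then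
            if mkUpd (tupGet g b_gender) (tupGet g a_gender) ngram ≠ ngram then
              some (mkUpd (tupGet g b_gender) (tupGet g a_gender) ngram,
                    gender_id_to_name b_gender ++ " to " ++ gender_id_to_name a_gender)
            else none
          else none) = (none : Option (String × String)) := by
          by_cases hin : PySem.Str.isIn (tupGet g b_gender) ngram = true
          · have hch : ¬ mkUpd (tupGet g b_gender) (tupGet g a_gender) ngram ≠ ngram :=
              fun hch => hc2 ((pv_cond_iff ngram _ _ hwb hwa).mp ⟨hin, hch⟩)
            rw [if_pos hin, if_neg hch]
          · rw [if_neg hin]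
        rw [h2, if_neg hc2]
        exact hrest

-- ---- B's build + scan = the same single scan ----
theorem pv_scanTable_eq_scanP (ngram : String) :
    ∀ (L : List (String × String × String)) (seen : PySem.Set String),
    (∀ e ∈ L, PySem.Set.contains seen e.1 = true → e.1 ∉ pySplit ngram) →
    scanTable (buildTable L seen) (pySplit ngram) ngram = scanP L ngram := by
  intro L
  induction L with
  | nil => intro seen _; rfl
  | cons e rest ih =>
    obtain ⟨w, r, lab⟩ := e
    intro seen hseen
    rw [buildTable, scanP]
    by_cases hb : r ≠ w ∧ ¬ PySem.Set.contains seen w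
    · rw [if_pos hb, scanTable]
      by_cases hm : w ∈ pySplit ngram
      · rw [if_pos hm, if_pos ⟨hm, hb.1⟩]
        rfl
      · rw [if_neg hm, if_neg (fun h => hm h.1)]
        apply ih
        intro e' he' hc
        have : e'.1 ∈ PySem.Set.add seen w := (PySem.Set.contains_iff _ _).mp hc
        rcases (PySem.Set.mem_add _ _ _).mp this with h | rfl
        · exact hseen e' (List.mem_cons_of_mem _ he') ((PySem.Set.contains_iff _ _).mpr h)
        · exact hm
    · have hcond : ¬ (w ∈ pySplit ngram ∧ r ≠ w) := by
        intro ⟨hm, hrw⟩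
        rcases not_and_or.mp hb with h | h
        · exact h hrw
        · rw [not_not] at h
          exact hseen (w, r, lab) (List.mem_cons_self ..) h hm
      rw [if_neg hb, if_neg hcond]
      apply ih
      intro e' he' hc
      exact hseen e' (List.mem_cons_of_mem _ he') hc

-- ===== VERDICT (by name: the statement is the Claim_ definition above) =====
theorem swap_pronouns_spec : Claim_equal_swap_pronouns := by
  intro ngram a_gender b_gender _ _
  show swap_pronouns ngram a_gender b_gender = swap_pronouns_alt ngram a_gender b_gender
  rw [swap_pronouns, swap_pronouns_alt,
      pv_swapGo_eq_scanP ngram a_gender b_gender PRONOUNS pv_PRONOUNS_sf,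
      pv_scanTable_eq_scanP ngram _ PySem.Set.empty (by intro e _ hc; simp [PySem.Set.empty] at hc)]
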